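-- pv_equiv track=rewrite | github.com/123gggd/python-csv-crm-cleaner | src/cleaner.py | _build_auto_mapping
-- ===== SOURCE A (Python) =====
-- from typing import Dict, List, Optional, Tuple
--
-- COMMON_ALIASES = {
--     "full_name": ["full name", "name", "contact name", "customer name"],
--     "first_name": ["first name", "firstname", "given name"],
--     "last_name": ["last name", "lastname", "surname", "family name"],
--     "email": ["email", "e-mail", "email address"],
--     "phone": ["phone", "telephone", "mobile"],
--     "last_clean_date": ["last clean date", "last_clean_date", "last service date", "service date", "date"],
--     "clean_type": ["clean type", "service", "service type", "type"],
--     "invoice_amount_brutto": [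
--         "invoice amount (brutto)",
--         "invoice amount brutto",
--         "brutto",
--         "gross",
--         "invoice amount",
--         "amount",
--     ],
-- }
--
-- def _normalize_header(h: str) -> str:
--     return " ".join(str(h).strip().lower().replace("_", " ").split())
--
-- def _build_auto_mapping(columns: List[str]) -> Dict[str, str]:
--     norm_cols = {c: _normalize_header(c) for c in columns}
--     reverse = {v: k for k, v in norm_cols.items()}  # normalized -> original
--
--     mapping: Dict[str, str] = {}
--     for canonical, aliases in COMMON_ALIASES.items():
--         for a in aliases:
--             a_norm = _normalize_header(a)
--             if a_norm in reverse:
--                 mapping[canonical] = reverse[a_norm]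
--                 break
--     return mapping
-- ===== SOURCE B (Python) =====
-- COMMON_ALIASES = {
--     "full_name": ["full name", "name", "contact name", "customer name"],
--     "first_name": ["first name", "firstname", "given name"],
--     "last_name": ["last name", "lastname", "surname", "family name"],
--     "email": ["email", "e-mail", "email address"],
--     "phone": ["phone", "telephone", "mobile"],
--     "last_clean_date": ["last clean date", "last_clean_date", "last service date", "service date", "date"],
--     "clean_type": ["clean type", "service", "service type", "type"],
--     "invoice_amount_brutto": [
--         "invoice amount (brutto)",
--         "invoice amount brutto",
--         "brutto",
--         "gross",
--         "invoice amount",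
--         "amount",
--     ],
-- }
--
-- def _normalize_header(h: str) -> str:
--     return " ".join(str(h).strip().lower().replace("_", " ").split())
--
-- def _best_for(aliases, columns):
--     # priority of each normalized alias = position of its first occurrence
--     priority = {}
--     for i, a in enumerate(aliases):
--         priority.setdefault(_normalize_header(a), i)
--     # one scan of the columns, keeping the best-priority match
--     best = None
--     for c in columns:
--         r = priority.get(_normalize_header(c))
--         if r is not None and (best is None or r < best[0]):
--             best = (r, c)
--     return best
--
-- def _build_auto_mapping(columns):
--     mapping = {}
--     for canonical, aliases in COMMON_ALIASES.items():
--         best = _best_for(aliases, columns)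
--         if best is not None:
--             mapping[canonical] = best[1]
--     return mapping
-- ===== Notes on version B (the rewrite author's own statement) =====
-- stated objective: alternative
-- what changed: B drops A's norm_cols/reverse dict pair and its alias-membership loop: for each canonical it builds an alias-priority index once and finds the mapped column by a single best-priority scan of the columns; Pre_ excludes column lists where two distinct columns normalize to the same header, on which A's pick among the tied columns is an accident of dict inversion.
-- outside the precondition, e.g. on _build_auto_mapping(['Name', 'NAME']): A returns {'full_name': 'NAME'}, B returns {'full_name': 'Name'}
import Mathlib
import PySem

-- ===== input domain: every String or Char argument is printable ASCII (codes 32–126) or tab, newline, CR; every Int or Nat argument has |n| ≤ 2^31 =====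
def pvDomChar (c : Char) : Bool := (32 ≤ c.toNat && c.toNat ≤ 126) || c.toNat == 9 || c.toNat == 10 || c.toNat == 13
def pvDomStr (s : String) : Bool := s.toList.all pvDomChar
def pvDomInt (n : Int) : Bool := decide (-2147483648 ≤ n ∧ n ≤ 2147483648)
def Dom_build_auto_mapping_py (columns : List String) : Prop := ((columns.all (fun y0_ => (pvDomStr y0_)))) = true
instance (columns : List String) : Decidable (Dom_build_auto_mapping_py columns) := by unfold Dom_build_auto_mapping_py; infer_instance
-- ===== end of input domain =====

-- B replaces A's reverse-dict-then-alias-scan by a per-canonical single scan of the columns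
-- keeping the match with the best alias priority (alternative decomposition; no speed claim).


-- ===== PORT A =====
-- _normalize_header: " ".join(str(h).strip().lower().replace("_", " ").split())
def nrmHeader (h : String) : String :=
  PySem.Str.join " " (PySem.Str.split₀ (PySem.Str.replace (PySem.Str.lower (PySem.Str.strip h)) "_" " "))

def commonAliases : List (String × List String) :=
  [ ("full_name", ["full name", "name", "contact name", "customer name"]),
    ("first_name", ["first name", "firstname", "given name"]),
    ("last_name", ["last name", "lastname", "surname", "family name"]),
    ("email", ["email", "e-mail", "email address"]),
    ("phone", ["phone", "telephone", "mobile"]),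
    ("last_clean_date", ["last clean date", "last_clean_date", "last service date", "service date", "date"]),
    ("clean_type", ["clean type", "service", "service type", "type"]),
    ("invoice_amount_brutto",
      ["invoice amount (brutto)", "invoice amount brutto", "brutto", "gross", "invoice amount", "amount"]) ]

-- inner 'for a in aliases: … break' of A
def aTryAliases (reverse : PySem.Dict String String) (mapping : PySem.Dict String String)
    (canonical : String) : List String → PySem.Dict String String
  | [] => mapping
  | a :: rest =>
    let a_norm := nrmHeader a
    match reverse.get? a_norm with          -- 'if a_norm in reverse: … reverse[a_norm]'
    | some orig => mapping.insert canonical orig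
    | none => aTryAliases reverse mapping canonical rest

def build_auto_mapping_py (columns : List String) : List (String × String) :=
  let norm_cols : PySem.Dict String String :=
    columns.foldl (fun d c => d.insert c (nrmHeader c)) PySem.Dict.empty
  let reverse : PySem.Dict String String :=
    norm_cols.items.foldl (fun d p => d.insert p.2 p.1) PySem.Dict.empty
  let mapping : PySem.Dict String String :=
    commonAliases.foldl (fun m ca => aTryAliases reverse m ca.1 ca.2) PySem.Dict.empty
  mapping.items

-- ===== PORT B =====
-- _best_for: a priority dict built over the aliases ('if n not in priority: priority[n] = i'),
-- then one scan of the columns keeping the best-priority match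
def bestFor (aliases : List String) (columns : List String) : Option (Int × String) :=
  let priority : PySem.Dict String Int :=
    (PySem.List.enumerate aliases).foldl (fun d p => d.setdefault (nrmHeader p.2) p.1) PySem.Dict.empty
  columns.foldl (fun best c =>
    match priority.get? (nrmHeader c) with
    | some r =>
      match best with
      | none => some (r, c)
      | some b => if r < b.1 then some (r, c) else best
    | none => best) none

def build_auto_mapping_py_alt (columns : List String) : List (String × String) :=
  (commonAliases.foldl (fun m ca =>
      match bestFor ca.2 columns with
      | some b => m.insert ca.1 b.2
      | none => m) PySem.Dict.empty).items

-- ===== PRECONDITION & SPEC =====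
-- Pre_ excludes column lists in which two DISTINCT columns normalize to the same header: there A's
-- pick among the tied columns is an accident of dict inversion (first-occurrence reinsertion order),
-- while B keeps the first best match; A raises nowhere.
def Pre_build_auto_mapping_py (columns : List String) : Prop :=
  ∀ c ∈ columns, ∀ d ∈ columns, nrmHeader c = nrmHeader d → c = d
instance (columns : List String) : Decidable (Pre_build_auto_mapping_py columns) := by
  unfold Pre_build_auto_mapping_py; infer_instance

def pvWitness_build_auto_mapping_py : List String := ["Email", "Phone", "Customer Name"]

def Spec_build_auto_mapping_py (columns : List String) (out : List (String × String)) : Prop := out = build_auto_mapping_py_alt columns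
instance (columns : List String) (out : List (String × String)) : Decidable (Spec_build_auto_mapping_py columns out) := by unfold Spec_build_auto_mapping_py; infer_instance

-- ===== CLAIM (what is proved, stated in full; the proofs are below) =====
def Claim_equal_build_auto_mapping_py : Prop := ∀ (columns : List String), Dom_build_auto_mapping_py columns → Pre_build_auto_mapping_py columns → Spec_build_auto_mapping_py columns (build_auto_mapping_py columns)

-- ===== LEMMAS AND PROOFS =====

-- PR: the setdefault fold over enumerate is first-occurrence lookup
theorem prio_fold_get (aliases : List String) (n : String) : ∀ (s : Int) (d : PySem.Dict String Int),
    ((PySem.List.enumerate aliases s).foldl (fun d p => d.setdefault (nrmHeader p.2) p.1) d).get? n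
      = (d.get? n).or ((aliases.findIdx? (fun a => nrmHeader a == n)).map (fun i : Nat => s + i)) := by
  induction aliases with
  | nil => intro s d; simp [PySem.List.enumerate_nil]
  | cons a as ih =>
    intro s d
    rw [PySem.List.enumerate_cons, List.foldl_cons]
    dsimp only
    rw [ih, List.findIdx?_cons]
    by_cases h : nrmHeader a = n
    · subst h
      rw [PySem.Dict.get?_setdefault_self]
      simp only [beq_self_eq_true, if_pos]
      cases hd : d.get? (nrmHeader a) <;> simp [Option.or]
    · rw [PySem.Dict.get?_setdefault_of_ne d s (fun hne => h (Eq.symm hne))]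
      simp only [beq_iff_eq, h, if_false, Option.map_map]
      congr 1
      refine congrArg₂ Option.map ?_ rfl
      funext i
      simp only [Function.comp_apply]
      push_cast
      ring

def lastMatch (k : String) (cols : List String) : Option String :=
  cols.foldl (fun acc c => if nrmHeader c = k then some c else acc) none

theorem lm_fold_mem (k : String) : ∀ (cols : List String) (init : Option String) (c : String),
    cols.foldl (fun acc c => if nrmHeader c = k then some c else acc) init = some c →
    (c ∈ cols ∧ nrmHeader c = k) ∨ init = some c := by
  intro cols
  induction cols with
  | nil => intro init c h; exact Or.inr h
  | cons x xs ih =>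
    intro init c h
    rw [List.foldl_cons] at h
    rcases ih _ c h with ⟨hm, hk⟩ | hinit
    · exact Or.inl ⟨List.mem_cons_of_mem _ hm, hk⟩
    · by_cases hx : nrmHeader x = k
      · rw [if_pos hx] at hinit
        cases hinit
        exact Or.inl ⟨List.mem_cons_self, hx⟩
      · rw [if_neg hx] at hinit
        exact Or.inr hinit

theorem lm_fold_nomatch (k : String) : ∀ (cols : List String) (init : Option String),
    (∀ c ∈ cols, nrmHeader c ≠ k) →
    cols.foldl (fun acc c => if nrmHeader c = k then some c else acc) init = init := by
  intro cols
  induction cols with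
  | nil => intro _ _; rfl
  | cons x xs ih =>
    intro init h
    rw [List.foldl_cons, if_neg (h x List.mem_cons_self)]
    exact ih init (fun c hc => h c (List.mem_cons_of_mem _ hc))

theorem lm_fold_uniq (k s : String) (hk : nrmHeader s = k) : ∀ (cols : List String) (init : Option String),
    (∀ d ∈ cols, nrmHeader d = k → d = s) → s ∈ cols →
    cols.foldl (fun acc c => if nrmHeader c = k then some c else acc) init = some s := by
  intro cols
  induction cols with
  | nil => intro _ _ h; cases h
  | cons x xs ih =>
    intro init huniq hmem
    rw [List.foldl_cons]
    by_cases hs : s ∈ xs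
    · exact ih _ (fun d hd => huniq d (List.mem_cons_of_mem _ hd)) hs
    · have hx : x = s := by
        rcases List.mem_cons.mp hmem with h | h
        · exact h.symm
        · exact absurd h hs
      subst hx
      rw [if_pos hk]
      exact lm_fold_nomatch k xs (some x) (fun d hd hdk => hs ((huniq d (List.mem_cons_of_mem _ hd) hdk) ▸ hd))

def aliasPrio (aliases : List String) (n : String) : Option Int :=
  (aliases.findIdx? (fun a => nrmHeader a == n)).map (fun i => (i : Int))

def scanStep (f : String → Option Int) (best : Option (Int × String)) (c : String) : Option (Int × String) :=
  match f (nrmHeader c) with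
  | some r =>
    match best with
    | none => some (r, c)
    | some b => if r < b.1 then some (r, c) else best
  | none => best

theorem aliasPrio_cons (a : String) (as : List String) (n : String) :
    aliasPrio (a :: as) n = if nrmHeader a = n then some 0 else (aliasPrio as n).map (fun r => r + 1) := by
  unfold aliasPrio
  rw [List.findIdx?_cons]
  by_cases h : nrmHeader a = n
  · simp [h]
  · simp only [beq_iff_eq, h, if_false, Option.map_map]
    cases List.findIdx? (fun a => nrmHeader a == n) as <;> simp

theorem aliasPrio_nonneg (as : List String) (n : String) (r : Int) (h : aliasPrio as n = some r) : 0 ≤ r := by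
  unfold aliasPrio at h
  cases hf : List.findIdx? (fun a => nrmHeader a == n) as with
  | none => rw [hf] at h; cases h
  | some i => rw [hf] at h; simp at h; omega

theorem scanB_none (f : String → Option Int) : ∀ (cols : List String) (init : Option (Int × String)),
    (∀ c ∈ cols, f (nrmHeader c) = none) →
    cols.foldl (scanStep f) init = init := by
  intro cols
  induction cols with
  | nil => intro _ _; rfl
  | cons x xs ih =>
    intro init h
    rw [List.foldl_cons]
    have hx : scanStep f init x = init := by unfold scanStep; rw [h x List.mem_cons_self]
    rw [hx]
    exact ih init (fun c hc => h c (List.mem_cons_of_mem _ hc))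

theorem scanB_hit (f : String → Option Int) (n s : String)
    (hf0 : f n = some 0)
    (hfpos : ∀ m r, f m = some r → 0 ≤ r ∧ (r = 0 → m = n))
    (hs : nrmHeader s = n) :
    ∀ (cols : List String) (init : Option (Int × String)),
    (∀ c ∈ cols, nrmHeader c = n → c = s) →
    (init = some (0, s) ∨ ((∀ p : Int × String, init = some p → 0 < p.1) ∧ s ∈ cols)) →
    cols.foldl (scanStep f) init = some (0, s) := by
  intro cols
  induction cols with
  | nil =>
    intro init _ hinv
    rcases hinv with h | ⟨_, h⟩
    · exact h
    · cases h
  | cons x xs ih =>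
    intro init huniq hinv
    rw [List.foldl_cons]
    rcases hinv with hzero | ⟨hpos, hmem⟩
    · subst hzero
      have hstep : scanStep f (some (0, s)) x = some (0, s) := by
        unfold scanStep
        cases hfx : f (nrmHeader x) with
        | none => rfl
        | some r =>
          have := (hfpos _ _ hfx).1
          simp only
          rw [if_neg (by omega)]
      rw [hstep]
      exact ih _ (fun c hc => huniq c (List.mem_cons_of_mem _ hc)) (Or.inl rfl)
    · by_cases hx : x = s
      · subst hx
        have hstep : scanStep f init x = some (0, x) := by
          unfold scanStep
          rw [hs, hf0]
          cases hi : init with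
          | none => rfl
          | some b =>
            have := hpos b hi
            simp only
            rw [if_pos this]
        rw [hstep]
        exact ih _ (fun c hc => huniq c (List.mem_cons_of_mem _ hc)) (Or.inl rfl)
      · have hmem' : s ∈ xs := by
          rcases List.mem_cons.mp hmem with h | h
          · exact absurd h.symm hx
          · exact h
        have hinv' : ∀ p : Int × String, scanStep f init x = some p → 0 < p.1 := by
          intro p hp
          unfold scanStep at hp
          cases hfx : f (nrmHeader x) with
          | none => rw [hfx] at hp; exact hpos p hp
          | some r =>
            rw [hfx] at hp
            have hr := hfpos _ _ hfx
            have hrpos : 0 < r := by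
              rcases lt_or_eq_of_le hr.1 with h | h
              · exact h
              · exact absurd (huniq x List.mem_cons_self (hr.2 h.symm)) hx
            cases hi : init with
            | none => rw [hi] at hp; cases hp; exact hrpos
            | some b =>
              rw [hi] at hp
              simp only at hp
              by_cases hlt : r < b.1
              · rw [if_pos hlt] at hp; cases hp; exact hrpos
              · rw [if_neg hlt] at hp; exact hpos p (hi ▸ hp)
        exact ih _ (fun c hc => huniq c (List.mem_cons_of_mem _ hc)) (Or.inr ⟨hinv', hmem'⟩)

theorem scanB_shift (f g : String → Option Int) :
    ∀ (cols : List String) (init : Option (Int × String)),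
    (∀ c ∈ cols, f (nrmHeader c) = (g (nrmHeader c)).map (fun r => r + 1)) →
    cols.foldl (scanStep f) (init.map (fun b => (b.1 + 1, b.2)))
      = (cols.foldl (scanStep g) init).map (fun b => (b.1 + 1, b.2)) := by
  intro cols
  induction cols with
  | nil => intro _ _; rfl
  | cons x xs ih =>
    intro init h
    rw [List.foldl_cons, List.foldl_cons]
    have hstep : scanStep f (init.map (fun b => (b.1 + 1, b.2))) x
        = (scanStep g init x).map (fun b => (b.1 + 1, b.2)) := by
      unfold scanStep
      rw [h x List.mem_cons_self]
      cases hg : g (nrmHeader x) with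
      | none => rfl
      | some r =>
        cases init with
        | none => rfl
        | some b =>
          simp only [Option.map_some]
          by_cases hlt : r < b.1
          · rw [if_pos hlt, if_pos (by omega)]; rfl
          · rw [if_neg hlt, if_neg (by omega)]; rfl
    rw [hstep]
    exact ih _ (fun c hc => h c (List.mem_cons_of_mem _ hc))

def firstA (cols : List String) : List String → Option String
  | [] => none
  | a :: rest =>
    match lastMatch (nrmHeader a) cols with
    | some c => some c
    | none => firstA cols rest

theorem scan_eq_firstA (cols : List String)
    (hpre : ∀ c ∈ cols, ∀ d ∈ cols, nrmHeader c = nrmHeader d → c = d) :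
    ∀ aliases : List String,
    (cols.foldl (scanStep (aliasPrio aliases)) none).map (·.2) = firstA cols aliases := by
  intro aliases
  induction aliases with
  | nil =>
    rw [scanB_none _ _ _ (fun c _ => rfl)]
    rfl
  | cons a as ih =>
    show (cols.foldl (scanStep (aliasPrio (a :: as))) none).map (·.2)
        = match lastMatch (nrmHeader a) cols with
          | some c => some c
          | none => firstA cols as
    cases h : lastMatch (nrmHeader a) cols with
    | some s =>
      rcases lm_fold_mem (nrmHeader a) cols none s h with ⟨hmem, hk⟩ | hbad
      · have huniq : ∀ c ∈ cols, nrmHeader c = nrmHeader a → c = s := fun c hc hck =>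
          hpre c hc s hmem (hck.trans hk.symm)
        have hf0 : aliasPrio (a :: as) (nrmHeader a) = some 0 := by
          rw [aliasPrio_cons, if_pos rfl]
        have hfpos : ∀ m r, aliasPrio (a :: as) m = some r → 0 ≤ r ∧ (r = 0 → m = nrmHeader a) := by
          intro m r hmr
          rw [aliasPrio_cons] at hmr
          by_cases hm : nrmHeader a = m
          · rw [if_pos hm] at hmr
            cases hmr
            exact ⟨le_refl 0, fun _ => hm.symm⟩
          · rw [if_neg hm] at hmr
            cases hg : aliasPrio as m with
            | none => rw [hg] at hmr; cases hmr
            | some r' =>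
              rw [hg] at hmr
              simp only [Option.map_some, Option.some.injEq] at hmr
              have h0 := aliasPrio_nonneg as m r' hg
              exact ⟨by omega, fun habs => absurd habs (by omega)⟩
        rw [scanB_hit (aliasPrio (a :: as)) (nrmHeader a) s hf0 hfpos hk cols none huniq
          (Or.inr ⟨(fun p hp => nomatch hp), hmem⟩)]
        rfl
      · cases hbad
    | none =>
      have hno : ∀ c ∈ cols, nrmHeader c ≠ nrmHeader a := by
        intro c hc hck
        have huniq : ∀ d ∈ cols, nrmHeader d = nrmHeader a → d = c := fun d hd hdk =>
          hpre d hd c hc (hdk.trans hck.symm)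
        unfold lastMatch at h
        rw [lm_fold_uniq (nrmHeader a) c hck cols none huniq hc] at h
        cases h
      have hfg : ∀ c ∈ cols, aliasPrio (a :: as) (nrmHeader c)
          = (aliasPrio as (nrmHeader c)).map (fun r => r + 1) := by
        intro c hc
        rw [aliasPrio_cons, if_neg (fun he => hno c hc he.symm)]
      have := scanB_shift (aliasPrio (a :: as)) (aliasPrio as) cols none hfg
      simp only [Option.map_none] at this
      rw [this, Option.map_map]
      exact ih

-- the priority dict built by B is first-occurrence alias lookup
theorem bestFor_eq_scan (aliases columns : List String) :
    bestFor aliases columns = columns.foldl (scanStep (aliasPrio aliases)) none := by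
  unfold bestFor
  have hp : ∀ n, ((PySem.List.enumerate aliases).foldl
      (fun d p => d.setdefault (nrmHeader p.2) p.1) (PySem.Dict.empty : PySem.Dict String Int)).get? n
      = aliasPrio aliases n := by
    intro n
    rw [prio_fold_get]
    rw [show ((PySem.Dict.empty : PySem.Dict String Int).get? n) = none from rfl]
    unfold aliasPrio
    cases List.findIdx? (fun a => nrmHeader a == n) aliases <;> simp [Option.or]
  have hfun : (fun (best : Option (Int × String)) (c : String) =>
      match ((PySem.List.enumerate aliases).foldl
          (fun d p => d.setdefault (nrmHeader p.2) p.1) (PySem.Dict.empty : PySem.Dict String Int)).get? (nrmHeader c) with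
      | some r =>
        match best with
        | none => some (r, c)
        | some b => if r < b.1 then some (r, c) else best
      | none => best) = scanStep (aliasPrio aliases) := by
    funext best c
    rw [hp]
    rfl
  show List.foldl _ none columns = _
  rw [hfun]

-- A-side: norm_cols items / reverse lookup (as in the ports)
theorem items_norm_fold (l : List String) (d : PySem.Dict String String)
    (h : d.items = d.keys.map (fun c => (c, nrmHeader c))) :
    (l.foldl (fun d c => d.insert c (nrmHeader c)) d).items
      = (l.foldl (fun d c => d.insert c (nrmHeader c)) d).keys.map (fun c => (c, nrmHeader c)) := by
  induction l generalizing d with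
  | nil => simpa using h
  | cons c rest ih =>
    simp only [List.foldl_cons]
    apply ih
    by_cases hc : d.contains c = true
    · rw [PySem.Dict.items_insert_of_contains _ _ hc, PySem.Dict.keys_insert_of_contains _ _ hc, h]
      simp only [List.map_map]
      apply List.map_congr_left
      intro x _
      by_cases hx : x = c <;> simp [hx]
    · rw [PySem.Dict.items_insert_of_not_contains _ _ (by simpa using hc),
          PySem.Dict.keys_insert_of_not_contains _ _ (by simpa using hc), h]
      simp

theorem get?_reverse_fold (l : List String) (d : PySem.Dict String String) (k : String) :
    ((l.foldl (fun d c => d.insert (nrmHeader c) c) d).get? k)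
      = l.foldl (fun acc c => if nrmHeader c = k then some c else acc) (d.get? k) := by
  induction l generalizing d with
  | nil => rfl
  | cons c rest ih =>
    have hins : (d.insert (nrmHeader c) c).get? k = if nrmHeader c = k then some c else d.get? k := by
      rw [PySem.Dict.get?_insert]
      by_cases h : nrmHeader c = k
      · simp [h]
      · simp [h, Ne.symm h]
    simp only [List.foldl_cons, ih, hins]

theorem lastMatch_dedup (columns : List String)
    (hpre : ∀ c ∈ columns, ∀ d ∈ columns, nrmHeader c = nrmHeader d → c = d) (k : String) :
    lastMatch k (PySem.List.dedup columns) = lastMatch k columns := by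
  cases h : lastMatch k columns with
  | some s =>
    rcases lm_fold_mem k columns none s h with ⟨hmem, hk⟩ | hbad
    · exact lm_fold_uniq k s hk (PySem.List.dedup columns) none
        (fun d hd hdk => hpre d ((PySem.List.mem_dedup _ _).mp hd) s hmem (hdk.trans hk.symm))
        ((PySem.List.mem_dedup _ _).mpr hmem)
    · cases hbad
  | none =>
    have hno : ∀ c ∈ columns, nrmHeader c ≠ k := by
      intro c hc hck
      unfold lastMatch at h
      rw [lm_fold_uniq k c hck columns none
        (fun d hd hdk => hpre d hd c hc (hdk.trans hck.symm)) hc] at h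
      cases h
    exact lm_fold_nomatch k _ none (fun c hc => hno c ((PySem.List.mem_dedup _ _).mp hc))

theorem tryAliases_eq (reverse : PySem.Dict String String) (columns : List String)
    (hrev : ∀ k, reverse.get? k = lastMatch k columns)
    (m : PySem.Dict String String) (K : String) (as : List String) :
    aTryAliases reverse m K as
      = match firstA columns as with
        | some c => m.insert K c
        | none => m := by
  induction as with
  | nil => rfl
  | cons a rest ih =>
    show (match reverse.get? (nrmHeader a) with
      | some orig => m.insert K orig
      | none => aTryAliases reverse m K rest) = _
    rw [hrev (nrmHeader a)]
    show _ = (match (match lastMatch (nrmHeader a) columns with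
        | some c => some c
        | none => firstA columns rest) with
      | some c => m.insert K c
      | none => m)
    cases lastMatch (nrmHeader a) columns with
    | some c => rfl
    | none => exact ih

theorem ports_agree (columns : List String)
    (hpre : ∀ c ∈ columns, ∀ d ∈ columns, nrmHeader c = nrmHeader d → c = d) :
    build_auto_mapping_py columns = build_auto_mapping_py_alt columns := by
  unfold build_auto_mapping_py build_auto_mapping_py_alt
  have hitems := items_norm_fold columns PySem.Dict.empty (by rfl)
  have hkeys : (columns.foldl (fun d c => d.insert c (nrmHeader c)) PySem.Dict.empty).keys
      = PySem.List.dedup columns := by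
    rw [PySem.Dict.keys_foldl_insert]
    simp [PySem.List.dedup_eq_ofList, PySem.Set.ofList, PySem.Set.update, PySem.Dict.keys_empty]
  have hrev : ∀ k,
      (((columns.foldl (fun d c => d.insert c (nrmHeader c)) PySem.Dict.empty).items.foldl
          (fun d p => d.insert p.2 p.1) PySem.Dict.empty).get? k)
        = lastMatch k columns := by
    intro k
    rw [hitems, hkeys, List.foldl_map, get?_reverse_fold]
    rw [show ((PySem.Dict.empty : PySem.Dict String String).get? k) = none from rfl]
    exact lastMatch_dedup columns hpre k
  have hstep : (fun (m : PySem.Dict String String) (ca : String × List String) =>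
        aTryAliases ((columns.foldl (fun d c => d.insert c (nrmHeader c)) PySem.Dict.empty).items.foldl
          (fun d p => d.insert p.2 p.1) PySem.Dict.empty) m ca.1 ca.2)
      = (fun m ca =>
          match bestFor ca.2 columns with
          | some b => m.insert ca.1 b.2
          | none => m) := by
    funext m ca
    rw [tryAliases_eq _ columns hrev m ca.1 ca.2]
    have hml := scan_eq_firstA columns hpre ca.2
    rw [bestFor_eq_scan]
    cases hb : columns.foldl (scanStep (aliasPrio ca.2)) none with
    | none => rw [hb] at hml; simp at hml; rw [← hml]
    | some b => rw [hb] at hml; simp at hml; rw [← hml]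
  dsimp only
  rw [hstep]

-- ===== VERDICT (by name: the statement is the Claim_ definition above) =====
theorem build_auto_mapping_py_spec : Claim_equal_build_auto_mapping_py := by
  intro columns _ hpre
  unfold Spec_build_auto_mapping_py
  exact ports_agree columns hpre
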